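-- pv_equiv track=rewrite | github.com/ArjunGajmer/aapkapainter-tasks | cricket_score.py | extract_individual_score
-- ===== SOURCE A (Python) =====
-- def extract_individual_score(arr):
--     total_player_one_runs = 0
--     total_player_two_runs = 0
--
--     first_player_strike = True
--     for runs in arr:
--         if first_player_strike:
--             total_player_one_runs += runs
--         else:
--             total_player_two_runs += runs
--         if runs&1:
--             first_player_strike = not first_player_strike
--     return total_player_one_runs, total_player_two_runs
-- ===== SOURCE B (Python) =====
-- def extract_individual_score(arr):
--     # pass 1: prefix parity of odd runs before each ball (0 = player one on strike)
--     par = 0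
--     pars = []
--     for r in arr:
--         pars.append(par)
--         par = (par + (r & 1)) % 2
--     # pass 2: player one takes the balls faced on even parity; player two gets the rest
--     p1 = sum(r for r, p in zip(arr, pars) if p == 0)
--     return p1, sum(arr) - p1
-- ===== Notes on version B (the rewrite author's own statement) =====
-- stated objective: alternative
-- what changed: Replaces the single stateful pass carrying two running totals and a strike flag by two passes: first a prefix-parity table of odd runs, then player one's total as the sum over balls with even prefix parity, player two's as sum(arr) minus it.
import Mathlib
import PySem

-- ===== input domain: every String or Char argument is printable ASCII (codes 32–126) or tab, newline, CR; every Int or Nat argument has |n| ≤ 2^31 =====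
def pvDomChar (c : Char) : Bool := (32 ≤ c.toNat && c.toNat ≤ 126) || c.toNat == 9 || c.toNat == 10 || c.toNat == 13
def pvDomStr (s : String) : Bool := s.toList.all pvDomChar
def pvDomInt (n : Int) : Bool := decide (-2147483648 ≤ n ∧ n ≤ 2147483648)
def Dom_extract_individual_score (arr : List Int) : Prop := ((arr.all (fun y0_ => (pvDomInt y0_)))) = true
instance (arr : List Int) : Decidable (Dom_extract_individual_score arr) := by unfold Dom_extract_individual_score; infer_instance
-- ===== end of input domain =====

-- B replaces A's single stateful pass (two running totals + strike flag) by a prefix-parity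
-- table plus a complement sum; objective: alternative decomposition, same cost.


-- ===== PORT A =====
-- one iteration of A's loop: credit the striker, then toggle on an odd score (runs & 1)
def pvStepA (st : Int × Int × Bool) (runs : Int) : Int × Int × Bool :=
  let st' : Int × Int × Bool :=
    if st.2.2 then (st.1 + runs, st.2.1, st.2.2) else (st.1, st.2.1 + runs, st.2.2)
  if PySem.Int.band runs 1 ≠ 0 then (st'.1, st'.2.1, !st'.2.2) else st'

def extract_individual_score (arr : List Int) : Int × Int :=
  let s := arr.foldl pvStepA (0, 0, true)
  (s.1, s.2.1)

-- ===== PORT B =====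
-- one iteration of B's first pass: append the current parity, then advance it
def pvStepB (s : Int × List Int) (r : Int) : Int × List Int :=
  (PySem.Int.mod (s.1 + PySem.Int.band r 1) 2, s.2 ++ [s.1])

def extract_individual_score_alt (arr : List Int) : Int × Int :=
  -- pass 1: prefix parity of odd runs before each ball
  let st := arr.foldl pvStepB (0, ([] : List Int))
  -- pass 2: sum of runs faced at even parity; the complement via the total
  let p1 := ((arr.zip st.2).filter (fun rp => rp.2 == 0)).foldl (fun a rp => a + rp.1) 0
  (p1, arr.sum - p1)

-- ===== PRECONDITION & SPEC =====
def Spec_extract_individual_score (arr : List Int) (out : Int × Int) : Prop := out = extract_individual_score_alt arr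
instance (arr : List Int) (out : Int × Int) : Decidable (Spec_extract_individual_score arr out) := by unfold Spec_extract_individual_score; infer_instance

-- ===== CLAIM (what is proved, stated in full; the proofs are below) =====
def Claim_equal_extract_individual_score : Prop := ∀ (arr : List Int), Dom_extract_individual_score arr → Spec_extract_individual_score arr (extract_individual_score arr)

-- ===== LEMMAS AND PROOFS =====

-- prefix-parity list B's first pass builds
def pvPars : List Int → Int → List Int
  | [], _ => []
  | r :: t, par => par :: pvPars t (PySem.Int.mod (par + PySem.Int.band r 1) 2)

-- the sum B's filtered zip computes, in recursive form
def pvSel : List Int → Int → Int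
  | [], _ => 0
  | r :: t, par => (if par == 0 then r else 0) + pvSel t (PySem.Int.mod (par + PySem.Int.band r 1) 2)

theorem pvNext_mem (r par : Int) :
    PySem.Int.mod (par + PySem.Int.band r 1) 2 = 0 ∨ PySem.Int.mod (par + PySem.Int.band r 1) 2 = 1 := by
  have h2 : 0 ≤ PySem.Int.mod (par + PySem.Int.band r 1) 2 := PySem.Int.mod_nonneg _ (by norm_num)
  have h3 : PySem.Int.mod (par + PySem.Int.band r 1) 2 < 2 := PySem.Int.mod_lt _ (by norm_num)
  omega

theorem pvStepA_eq (p1 p2 par r : Int) (h : par = 0 ∨ par = 1) :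
    pvStepA (p1, p2, decide (par = 0)) r
      = ((if par = 0 then p1 + r else p1), (if par = 0 then p2 else p2 + r),
          decide (PySem.Int.mod (par + PySem.Int.band r 1) 2 = 0)) := by
  have hb := PySem.Int.band_one r
  unfold pvStepA
  rw [hb]
  obtain ⟨m, hmg, hm01⟩ : ∃ m, PySem.Int.mod r 2 = m ∧ (m = 0 ∨ m = 1) := by
    have h0 : 0 ≤ PySem.Int.mod r 2 := PySem.Int.mod_nonneg r (by norm_num)
    have h1 : PySem.Int.mod r 2 < 2 := PySem.Int.mod_lt r (by norm_num)
    exact ⟨_, rfl, by omega⟩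
  rw [hmg]
  rcases h with h | h <;> rcases hm01 with hm | hm <;> subst h <;> subst hm <;>
    simp [show PySem.Int.mod (0 : Int) 2 = 0 from by decide,
          show PySem.Int.mod (1 : Int) 2 = 1 from by decide,
          show PySem.Int.mod (2 : Int) 2 = 0 from by decide,
          show ((1 : Int) + 1) = 2 from by norm_num]

-- A's fold in terms of pvSel and the list sum
theorem pvFoldA (arr : List Int) : ∀ (p1 p2 par : Int), par = 0 ∨ par = 1 →
    arr.foldl pvStepA (p1, p2, decide (par = 0))
    = (p1 + pvSel arr par, p2 + (arr.sum - pvSel arr par),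
        decide (arr.foldl (fun q runs => PySem.Int.mod (q + PySem.Int.band runs 1) 2) par = 0)) := by
  induction arr with
  | nil => intro p1 p2 par _; simp [pvSel]
  | cons r t ih =>
    intro p1 p2 par hpar
    rw [List.foldl_cons, pvStepA_eq p1 p2 par r hpar, ih _ _ _ (pvNext_mem r par),
        List.foldl_cons]
    simp only [pvSel, List.sum_cons]
    by_cases hp : par = 0 <;> simp [hp] <;> ring

-- B's first pass builds pvPars
theorem pvFoldB (arr : List Int) : ∀ (par : Int) (acc : List Int),
    (arr.foldl pvStepB (par, acc)).2 = acc ++ pvPars arr par := by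
  induction arr with
  | nil => intro par acc; simp [pvPars]
  | cons r t ih =>
    intro par acc
    rw [List.foldl_cons, show pvStepB (par, acc) r
      = (PySem.Int.mod (par + PySem.Int.band r 1) 2, acc ++ [par]) from rfl, ih]
    simp [pvPars]

-- B's filtered-zip sum equals pvSel
theorem pvZipSel (arr : List Int) : ∀ (par a : Int),
    ((arr.zip (pvPars arr par)).filter (fun rp => rp.2 == 0)).foldl (fun a rp => a + rp.1) a
    = a + pvSel arr par := by
  induction arr with
  | nil => intro par a; simp [pvPars, pvSel]
  | cons r t ih =>
    intro par a
    simp only [pvPars, pvSel, List.zip_cons_cons, List.filter_cons]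
    by_cases hp : par = 0 <;> simp [hp, ih] <;> ring

-- ===== VERDICT (by name: the statement is the Claim_ definition above) =====
theorem extract_individual_score_spec : Claim_equal_extract_individual_score := by
  intro arr _
  unfold Spec_extract_individual_score
  have hA := pvFoldA arr 0 0 0 (Or.inl rfl)
  have hB := pvFoldB arr 0 []
  simp only [List.nil_append] at hB
  simp only [decide_true] at hA
  have hZ := pvZipSel arr 0 0
  simp [extract_individual_score, extract_individual_score_alt, hA, hB, hZ]
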